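-- pv_equiv track=rewrite | github.com/AndreBFarias/protocolo-ouroboros | src/intake/inbox_reader.py | contar_estados
-- ===== SOURCE A (Python) =====
-- def contar_estados(itens: list[dict]) -> dict[str, int]:
--     """Soma por estado para a barra de status.
--
--     Estados conhecidos: aguardando, extraido, falhou, duplicado. Total
--     derivado por ``len(itens)``.
--     """
--     contagens: dict[str, int] = {
--         "aguardando": 0,
--         "extraido": 0,
--         "falhou": 0,
--         "duplicado": 0,
--     }
--     for it in itens:
--         estado = it.get("estado", "aguardando")
--         if estado in contagens:
--             contagens[estado] += 1
--     return contagens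
-- ===== SOURCE B (Python) =====
-- def contar_estados(itens: list[dict]) -> dict[str, int]:
--     return {
--         k: sum(1 for it in itens if it.get("estado", "aguardando") == k)
--         for k in ("aguardando", "extraido", "falhou", "duplicado")
--     }
-- ===== Notes on version B (the rewrite author's own statement) =====
-- stated objective: alternative
-- what changed: Replaces the single accumulating pass over a mutable counts dict with a dict comprehension over the four fixed state keys, counting each state by an independent scan (sum of a generator); unknown states are dropped and missing states default to 'aguardando' via the predicate.
import Mathlib
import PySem

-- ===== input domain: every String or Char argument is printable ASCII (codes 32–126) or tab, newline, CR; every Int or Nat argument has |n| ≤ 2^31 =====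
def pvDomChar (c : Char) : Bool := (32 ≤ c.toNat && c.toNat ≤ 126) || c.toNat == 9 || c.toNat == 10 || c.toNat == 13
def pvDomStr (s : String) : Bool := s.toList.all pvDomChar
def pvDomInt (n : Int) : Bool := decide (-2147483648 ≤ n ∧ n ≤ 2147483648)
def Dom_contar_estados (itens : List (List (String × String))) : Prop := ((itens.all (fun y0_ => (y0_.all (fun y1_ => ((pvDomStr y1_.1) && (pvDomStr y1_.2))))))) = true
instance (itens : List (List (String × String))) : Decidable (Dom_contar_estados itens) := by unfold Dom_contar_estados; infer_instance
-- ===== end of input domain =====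

-- B replaces A's single accumulating pass over a mutable counts dict by a map over the
-- four fixed state keys, each counted by an independent scan (alternative decomposition).


-- ===== PORT A =====
-- it.get("estado", "aguardando") on an association-list dict: first match, with default
def estadoOf (it : List (String × String)) : String :=
  ((it.find? (fun p => p.1 == "estado")).map Prod.snd).getD "aguardando"

def contar_estados (itens : List (List (String × String))) : List (String × Int) :=
  let contagens : PySem.Dict String Int :=
    PySem.Dict.ofList [("aguardando", 0), ("extraido", 0), ("falhou", 0), ("duplicado", 0)]
  let final := itens.foldl (fun d it =>
    let estado := estadoOf it
    if d.contains estado then d.modify estado 0 (· + 1) else d) contagens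
  final.items

-- ===== PORT B =====
def contar_estados_alt (itens : List (List (String × String))) : List (String × Int) :=
  ["aguardando", "extraido", "falhou", "duplicado"].map
    (fun k => (k, (itens.countP (fun it => estadoOf it == k) : Int)))

-- ===== PRECONDITION & SPEC =====
def Spec_contar_estados (itens : List (List (String × String))) (out : List (String × Int)) : Prop := out = contar_estados_alt itens
instance (itens : List (List (String × String))) (out : List (String × Int)) : Decidable (Spec_contar_estados itens out) := by unfold Spec_contar_estados; infer_instance

-- ===== CLAIM (what is proved, stated in full; the proofs are below) =====
def Claim_equal_contar_estados : Prop := ∀ (itens : List (List (String × String))), Dom_contar_estados itens → Spec_contar_estados itens (contar_estados itens)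

-- ===== LEMMAS AND PROOFS =====
lemma mod_ag (a e f u : Int) :
    (PySem.Dict.mk [("aguardando", a), ("extraido", e), ("falhou", f), ("duplicado", u)]).modify "aguardando" 0 (· + 1)
    = PySem.Dict.mk [("aguardando", a + 1), ("extraido", e), ("falhou", f), ("duplicado", u)] := by
  apply PySem.Dict.ext
  simp [PySem.Dict.modify, PySem.Dict.insert, PySem.Dict.getD, PySem.Dict.get?, PySem.Dict.contains]

lemma mod_ex (a e f u : Int) :
    (PySem.Dict.mk [("aguardando", a), ("extraido", e), ("falhou", f), ("duplicado", u)]).modify "extraido" 0 (· + 1)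
    = PySem.Dict.mk [("aguardando", a), ("extraido", e + 1), ("falhou", f), ("duplicado", u)] := by
  apply PySem.Dict.ext
  simp [PySem.Dict.modify, PySem.Dict.insert, PySem.Dict.getD, PySem.Dict.get?, PySem.Dict.contains]

lemma mod_fa (a e f u : Int) :
    (PySem.Dict.mk [("aguardando", a), ("extraido", e), ("falhou", f), ("duplicado", u)]).modify "falhou" 0 (· + 1)
    = PySem.Dict.mk [("aguardando", a), ("extraido", e), ("falhou", f + 1), ("duplicado", u)] := by
  apply PySem.Dict.ext
  simp [PySem.Dict.modify, PySem.Dict.insert, PySem.Dict.getD, PySem.Dict.get?, PySem.Dict.contains]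

lemma mod_du (a e f u : Int) :
    (PySem.Dict.mk [("aguardando", a), ("extraido", e), ("falhou", f), ("duplicado", u)]).modify "duplicado" 0 (· + 1)
    = PySem.Dict.mk [("aguardando", a), ("extraido", e), ("falhou", f), ("duplicado", u + 1)] := by
  apply PySem.Dict.ext
  simp [PySem.Dict.modify, PySem.Dict.insert, PySem.Dict.getD, PySem.Dict.get?, PySem.Dict.contains]

lemma fold_items (itens : List (List (String × String))) (a e f u : Int) :
    (itens.foldl (fun d it =>
        let estado := estadoOf it
        if d.contains estado then d.modify estado 0 (· + 1) else d)
      (PySem.Dict.mk [("aguardando", a), ("extraido", e), ("falhou", f), ("duplicado", u)])).items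
    = [("aguardando", a + itens.countP (fun it => estadoOf it == "aguardando")),
       ("extraido",   e + itens.countP (fun it => estadoOf it == "extraido")),
       ("falhou",     f + itens.countP (fun it => estadoOf it == "falhou")),
       ("duplicado",  u + itens.countP (fun it => estadoOf it == "duplicado"))] := by
  induction itens generalizing a e f u with
  | nil => simp
  | cons it rest ih =>
    simp only [List.foldl_cons, List.countP_cons]
    by_cases h1 : estadoOf it = "aguardando"
    · simp only [h1]
      rw [if_pos (by simp [PySem.Dict.contains]), mod_ag, ih]
      simp; ring
    · by_cases h2 : estadoOf it = "extraido"
      · simp only [h2]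
        rw [if_pos (by simp [PySem.Dict.contains]), mod_ex, ih]
        simp; ring
      · by_cases h3 : estadoOf it = "falhou"
        · simp only [h3]
          rw [if_pos (by simp [PySem.Dict.contains]), mod_fa, ih]
          simp; ring
        · by_cases h4 : estadoOf it = "duplicado"
          · simp only [h4]
            rw [if_pos (by simp [PySem.Dict.contains]), mod_du, ih]
            simp; ring
          · rw [if_neg (by simp [PySem.Dict.contains, Ne.symm h1, Ne.symm h2, Ne.symm h3, Ne.symm h4]), ih]
            simp [h1, h2, h3, h4]

-- ===== VERDICT (by name: the statement is the Claim_ definition above) =====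
theorem contar_estados_spec : Claim_equal_contar_estados := by
  intro itens _
  show contar_estados itens = contar_estados_alt itens
  have h : (PySem.Dict.ofList [("aguardando", (0:Int)), ("extraido", 0), ("falhou", 0), ("duplicado", 0)])
      = PySem.Dict.mk [("aguardando", 0), ("extraido", 0), ("falhou", 0), ("duplicado", 0)] := by decide
  simp only [contar_estados, contar_estados_alt, h, fold_items]
  simp
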